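-- pv_equiv track=rewrite | github.com/LumaDevelopment/JobSpotBot | jobs_check.py | filter_jobs_with_keywords
-- ===== SOURCE A (Python) =====
-- def filter_jobs_with_keywords(new_jobs: set[tuple[str, str]], keywords: set) -> set[tuple[str, str]]:
--     """
--     Given a set of new jobs and keywords, returns a
--     set of new jobs, where each job's title includes
--     at least one of the given keywords.
--     """
--
--     filtered_new_jobs = set()
--
--     for job in new_jobs:
--         # Make job name lowercase, as keywords
--         # are case-insensitive (for simplicity)
--         job_name = job[0].lower()
--         match = False
--
--         # Assume all keywords are lowercase,
--         # because they are
--         for keyword in keywords: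
--             if keyword in job_name:
--                 match = True
--                 break
--
--         if match:
--             filtered_new_jobs.add(job)
--
--     return filtered_new_jobs
-- ===== SOURCE B (Python) =====
-- def filter_jobs_with_keywords(new_jobs: set, keywords: set) -> set:
--     """Jobs whose (lowercased) title contains at least one keyword.
--
--     Index every substring of the title no longer than the longest keyword
--     into a set, then intersect with the keyword set: per-title work no
--     longer scans keyword by keyword.
--     """
--     max_len = max(map(len, keywords), default=0)
--
--     def substrings(s):
--         return {s[i:i + n] for i in range(len(s) + 1)
--                 for n in range(min(max_len, len(s) - i) + 1)}
--
--     return {job for job in new_jobs if keywords & substrings(job[0].lower())}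
-- ===== Notes on version B (the rewrite author's own statement) =====
-- stated objective: alternative
-- what changed: B replaces A's per-keyword 'keyword in title' scan with a break flag by indexing each lowered title's substrings up to the longest keyword length into a set and intersecting it with the keyword set, collecting matches with a set comprehension.
import Mathlib
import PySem

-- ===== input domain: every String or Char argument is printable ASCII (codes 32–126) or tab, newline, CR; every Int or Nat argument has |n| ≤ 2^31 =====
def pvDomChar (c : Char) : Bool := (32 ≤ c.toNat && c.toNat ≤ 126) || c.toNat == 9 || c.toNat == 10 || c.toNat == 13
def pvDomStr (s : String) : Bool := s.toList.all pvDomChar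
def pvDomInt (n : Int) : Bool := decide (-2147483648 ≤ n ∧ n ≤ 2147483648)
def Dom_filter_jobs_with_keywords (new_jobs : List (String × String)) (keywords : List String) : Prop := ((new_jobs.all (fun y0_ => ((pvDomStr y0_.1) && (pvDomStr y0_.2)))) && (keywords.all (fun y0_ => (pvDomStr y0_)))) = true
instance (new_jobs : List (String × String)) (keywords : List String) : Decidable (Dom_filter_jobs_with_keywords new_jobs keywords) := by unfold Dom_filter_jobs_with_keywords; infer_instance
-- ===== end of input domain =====

-- B matches each title by intersecting the keyword set with the set of the title's substrings
-- no longer than the longest keyword (set intersection instead of a per-keyword scan).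
-- RETURN-VALUE equivalence of two set-valued functions; neither mutates its arguments.

-- ===== PORT A =====
-- for keyword in keywords: if keyword in job_name: match = True; break   (boolean flag fold)
def pvAMatch (keywords : List String) (job_name : String) : Bool :=
  keywords.foldl (fun m keyword => if m then m else PySem.Str.isIn keyword job_name) false

def filter_jobs_with_keywords (new_jobs : List (String × String)) (keywords : List String) : List (String × String) :=
  new_jobs.foldl
    (fun filtered_new_jobs job =>
      let job_name := PySem.Str.lower job.1
      if pvAMatch keywords job_name then PySem.Set.add filtered_new_jobs job else filtered_new_jobs)
    PySem.Set.empty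

-- ===== PORT B =====
-- {s[i:i+n] for i in range(len(s)+1) for n in range(min(max_len, len(s)-i)+1)};
-- s[i:i+n] with 0 ≤ i, 0 ≤ n is exactly take n of drop i over the character list
def pvSubstrings (maxLen : Nat) (s : String) : PySem.Set String :=
  PySem.Set.ofList
    ((List.range (s.toList.length + 1)).flatMap (fun i =>
      (List.range (min maxLen (s.toList.length - i) + 1)).map (fun n =>
        String.ofList ((s.toList.drop i).take n))))

-- max(map(len, keywords), default=0) is a fold of max over the lengths;
-- Python truthiness of 'keywords & substrings(...)': the intersection is non-empty
def filter_jobs_with_keywords_alt (new_jobs : List (String × String)) (keywords : List String) : List (String × String) :=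
  let maxLen := (keywords.map (fun k => k.toList.length)).foldl max 0
  PySem.Set.ofList
    (new_jobs.filter (fun job =>
      !(PySem.Set.inter keywords (pvSubstrings maxLen (PySem.Str.lower job.1))).isEmpty))

-- ===== PRECONDITION & SPEC =====
def Spec_filter_jobs_with_keywords (new_jobs : List (String × String)) (keywords : List String) (out : List (String × String)) : Prop := out = filter_jobs_with_keywords_alt new_jobs keywords
instance (new_jobs : List (String × String)) (keywords : List String) (out : List (String × String)) : Decidable (Spec_filter_jobs_with_keywords new_jobs keywords out) := by unfold Spec_filter_jobs_with_keywords; infer_instance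

-- ===== CLAIM =====
def Claim_equal_filter_jobs_with_keywords : Prop := ∀ (new_jobs : List (String × String)) (keywords : List String), Dom_filter_jobs_with_keywords new_jobs keywords → Spec_filter_jobs_with_keywords new_jobs keywords (filter_jobs_with_keywords new_jobs keywords)

-- ===== LEMMAS AND PROOFS =====

-- A's break-flag fold over keywords is the boolean 'any'
theorem pvAMatch_eq_any (keywords : List String) (s : String) :
    pvAMatch keywords s = keywords.any (fun kw => PySem.Str.isIn kw s) := by
  unfold pvAMatch
  induction keywords with
  | nil => rfl
  | cons k ks ih =>
    simp only [List.foldl_cons, List.any_cons]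
    cases h : PySem.Str.isIn k s with
    | false => simpa [h] using ih
    | true =>
      simp only [Bool.true_or]
      clear ih
      induction ks with
      | nil => rfl
      | cons k' ks' ih' => simpa using ih'

-- any element is bounded by a fold of max
theorem le_foldl_max_nat (l : List Nat) (a x : Nat) (h : x ∈ l ∨ x ≤ a) :
    x ≤ l.foldl max a := by
  induction l generalizing a with
  | nil => simpa using h
  | cons y ys ih =>
    simp only [List.mem_cons] at h
    apply ih
    rcases h with (rfl | hm) | hle
    · right; omega
    · left; exact hm
    · right; omega

-- membership in the substrings set: an infix no longer than maxLen
theorem mem_pvSubstrings (maxLen : Nat) (kw s : String) :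
    kw ∈ pvSubstrings maxLen s ↔ kw.toList <:+: s.toList ∧ kw.toList.length ≤ maxLen := by
  unfold pvSubstrings
  rw [PySem.Set.mem_ofList]
  simp only [List.mem_flatMap, List.mem_map, List.mem_range]
  constructor
  · rintro ⟨i, hi, n, hn, rfl⟩
    rw [String.toList_ofList]
    refine ⟨(List.take_prefix _ _).isInfix.trans (List.drop_suffix i s.toList).isInfix, ?_⟩
    simp only [List.length_take, List.length_drop]
    omega
  · rintro ⟨hinf, hlen⟩
    obtain ⟨j, hpre⟩ := (PySem.Chars.exists_prefix_drop_iff_isIn kw.toList s.toList).mpr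
      ((PySem.Chars.isIn_iff_infix kw.toList s.toList).mpr hinf)
    by_cases hj : j ≤ s.toList.length
    · have hle := hpre.length_le
      rw [List.length_drop] at hle
      refine ⟨j, by omega, kw.toList.length, by omega, ?_⟩
      have htake : (s.toList.drop j).take kw.toList.length = kw.toList :=
        (List.prefix_iff_eq_take.mp hpre).symm
      rw [htake, String.ofList_toList]
    · have hdrop : s.toList.drop j = [] := List.drop_eq_nil_of_le (by omega)
      rw [hdrop] at hpre
      have hk : kw.toList = [] := List.prefix_nil.mp hpre
      refine ⟨0, by omega, 0, by omega, ?_⟩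
      simp only [List.take_zero, List.drop_zero]
      rw [show String.ofList ([] : List Char) = String.ofList kw.toList from by rw [hk],
        String.ofList_toList]

-- the two match tests agree when maxLen bounds every keyword's length
theorem match_eq (keywords : List String) (maxLen : Nat) (t : String)
    (h : ∀ kw ∈ keywords, kw.toList.length ≤ maxLen) :
    pvAMatch keywords (PySem.Str.lower t)
      = !(PySem.Set.inter keywords (pvSubstrings maxLen (PySem.Str.lower t))).isEmpty := by
  rw [pvAMatch_eq_any, Bool.eq_iff_iff]
  simp only [List.any_eq_true, Bool.not_eq_true', List.isEmpty_eq_false_iff_exists_mem]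
  constructor
  · rintro ⟨kw, hkw, hin⟩
    refine ⟨kw, ?_⟩
    rw [PySem.Set.mem_inter]
    exact ⟨hkw, (mem_pvSubstrings maxLen kw _).mpr
      ⟨(PySem.Str.isIn_iff_infix kw _).mp hin, h kw hkw⟩⟩
  · rintro ⟨kw, hkw⟩
    rw [PySem.Set.mem_inter] at hkw
    exact ⟨kw, hkw.1,
      (PySem.Str.isIn_iff_infix kw _).mpr ((mem_pvSubstrings maxLen kw _).mp hkw.2).1⟩

-- conditional Set.add fold equals ofList of the filter
theorem foldl_add_filter {α : Type} [BEq α] (p : α → Bool) (xs : List α) (acc : PySem.Set α) :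
    xs.foldl (fun s x => if p x then PySem.Set.add s x else s) acc
      = (xs.filter p).foldl PySem.Set.add acc := by
  induction xs generalizing acc with
  | nil => rfl
  | cons x xs ih =>
    by_cases h : p x = true <;> simp [h, ih]

-- ===== VERDICT =====
theorem filter_jobs_with_keywords_spec : Claim_equal_filter_jobs_with_keywords := by
  intro new_jobs keywords _
  unfold Spec_filter_jobs_with_keywords filter_jobs_with_keywords filter_jobs_with_keywords_alt
  rw [PySem.Set.ofList_eq_foldl, ← foldl_add_filter]
  rw [show PySem.Set.empty = ([] : PySem.Set (String × String)) from rfl]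
  congr 1
  funext s job
  show (if pvAMatch keywords (PySem.Str.lower job.1) then PySem.Set.add s job else s) = _
  rw [match_eq keywords _ job.1]
  intro kw hkw
  exact le_foldl_max_nat _ 0 _ (Or.inl (List.mem_map_of_mem hkw))
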